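-- pv_equiv track=rewrite | github.com/D3struf/Killer-Sudoku | test.py | get_max_errors_cage
-- ===== SOURCE A (Python) =====
-- def get_max_errors_cage(board, cages, row_col_errors, duplicates, modify):
--     max_errors = -1
--     max_errors_cage_index = -1
--
--     for i, (cage_sum, cells) in enumerate(cages):
--         if i != modify:
--             cage_errors = count_cage_errors(cells, row_col_errors, duplicates)
--             if cage_errors > max_errors:
--                 max_errors = cage_errors
--                 max_errors_cage_index = i
--
--     return max_errors_cage_index
--
-- def count_cage_errors(cells, row_col_errors, duplicates):
--     cage_errors = 0
--     for coord in cells: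
--         if coord in row_col_errors.values():
--             cage_errors += 1
--     for coord_list in duplicates.values():
--         for coord in coord_list:
--             if coord in cells:
--                 cage_errors += 1
--     return cage_errors
-- ===== SOURCE B (Python) =====
-- def get_max_errors_cage(board, cages, row_col_errors, duplicates, modify):
--     # Inverted index: coordinate -> owning cage indices (with multiplicity),
--     # built in one scan of cages; then bump per-cage counters from the error
--     # sources via the index, and finish with a first-wins strict argmax scan.
--     owners = {}
--     for i, (_, cells) in enumerate(cages):
--         for c in cells:
--             owners[c] = owners.get(c, []) + [i]
--     counts = {}
--     for v in set(row_col_errors.values()):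
--         for i in owners.get(v, []):
--             counts[i] = counts.get(i, 0) + 1
--     for coord_list in duplicates.values():
--         for c in coord_list:
--             for i in set(owners.get(c, [])):
--                 counts[i] = counts.get(i, 0) + 1
--     best = -1
--     best_index = -1
--     for i in range(len(cages)):
--         if i != modify:
--             cnt = counts.get(i, 0)
--             if cnt > best:
--                 best = cnt
--                 best_index = i
--     return best_index
-- ===== Notes on version B (the rewrite author's own statement) =====
-- stated objective: faster
-- what changed: B builds an inverted index (dict mapping each coordinate to the cage indices that contain it, with multiplicity) in one scan of cages, bumps per-cage counters in a dict by looking the error coordinates up in that index, and finishes with a first-wins strict argmax over range(len(cages)); A instead rescans every cage's cell list against both error collections while tracking a running maximum.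
import Mathlib
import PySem

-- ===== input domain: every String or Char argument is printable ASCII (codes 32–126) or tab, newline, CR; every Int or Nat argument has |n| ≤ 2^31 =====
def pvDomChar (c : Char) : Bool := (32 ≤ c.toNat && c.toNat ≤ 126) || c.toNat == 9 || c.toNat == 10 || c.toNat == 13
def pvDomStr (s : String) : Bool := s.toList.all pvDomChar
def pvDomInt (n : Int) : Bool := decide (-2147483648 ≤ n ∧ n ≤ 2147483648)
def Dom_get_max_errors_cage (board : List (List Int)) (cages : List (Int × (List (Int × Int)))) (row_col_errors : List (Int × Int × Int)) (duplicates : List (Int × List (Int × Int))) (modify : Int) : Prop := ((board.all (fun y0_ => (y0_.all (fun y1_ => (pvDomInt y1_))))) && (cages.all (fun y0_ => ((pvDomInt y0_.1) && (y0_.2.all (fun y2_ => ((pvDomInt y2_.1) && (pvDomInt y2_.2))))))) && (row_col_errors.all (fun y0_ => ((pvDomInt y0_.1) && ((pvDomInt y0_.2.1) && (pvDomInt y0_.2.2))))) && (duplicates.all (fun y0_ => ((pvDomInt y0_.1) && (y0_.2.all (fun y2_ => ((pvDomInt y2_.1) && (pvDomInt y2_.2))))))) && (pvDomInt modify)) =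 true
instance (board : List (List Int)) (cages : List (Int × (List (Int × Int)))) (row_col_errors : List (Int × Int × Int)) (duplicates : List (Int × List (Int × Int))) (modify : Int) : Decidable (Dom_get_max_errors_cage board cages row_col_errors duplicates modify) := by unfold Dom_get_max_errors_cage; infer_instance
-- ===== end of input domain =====

-- B replaces A's cage-major rescans (recounting every cage's errors against the error lists) by an
-- inverted index: one scan of cages builds a coordinate -> owning-cage-indices map, the error
-- sources bump per-cage counters through that map, and a final first-wins argmax scan picks the
-- cage; same return value, measurably faster on a timing run's generated inputs.

-- ===== PORT A =====
def count_cage_errors (cells : List (Int × Int)) (row_col_errors : List (Int × Int × Int)) (duplicates : List (Int × List (Int × Int))) : Int :=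
  let vals := row_col_errors.map Prod.snd
  let e1 := cells.foldl (fun acc coord => if coord ∈ vals then acc + 1 else acc) 0
  duplicates.foldl (fun acc p => p.2.foldl (fun a coord => if coord ∈ cells then a + 1 else a) acc) e1

def get_max_errors_cage (board : List (List Int)) (cages : List (Int × (List (Int × Int)))) (row_col_errors : List (Int × Int × Int)) (duplicates : List (Int × List (Int × Int))) (modify : Int) : Int :=
  ((PySem.List.enumerate cages).foldl
    (fun (st : Int × Int) p =>
      if p.1 ≠ modify then
        let cage_errors := count_cage_errors p.2.2 row_col_errors duplicates
        if cage_errors > st.1 then (cage_errors, p.1) else st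
      else st)
    (-1, -1)).2

-- ===== PORT B =====
-- owners[c] = owners.get(c, []) + [i]  (coordinate -> owning cage indices, with multiplicity)
def pvOwners (cages : List (Int × (List (Int × Int)))) : PySem.Dict (Int × Int) (List Int) :=
  (PySem.List.enumerate cages).foldl
    (fun d p => p.2.2.foldl (fun d c => d.modify c [] (· ++ [p.1])) d)
    PySem.Dict.empty

-- counts[i] = counts.get(i, 0) + 1, driven by the two error sources through the owners index
def pvCounts (cages : List (Int × (List (Int × Int)))) (row_col_errors : List (Int × Int × Int)) (duplicates : List (Int × List (Int × Int))) : PySem.Dict Int Int :=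
  let owners := pvOwners cages
  let counts1 := (PySem.Set.ofList (row_col_errors.map Prod.snd)).foldl
    (fun d v => (owners.getD v []).foldl (fun d i => d.modify i 0 (· + 1)) d)
    PySem.Dict.empty
  duplicates.foldl
    (fun d p => p.2.foldl
      (fun d c => (PySem.Set.ofList (owners.getD c [])).foldl (fun d i => d.modify i 0 (· + 1)) d) d)
    counts1

def get_max_errors_cage_alt (board : List (List Int)) (cages : List (Int × (List (Int × Int)))) (row_col_errors : List (Int × Int × Int)) (duplicates : List (Int × List (Int × Int))) (modify : Int) : Int :=
  let counts := pvCounts cages row_col_errors duplicates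
  ((PySem.List.pyRange 0 (cages.length : Int) 1).foldl
    (fun (st : Int × Int) i =>
      if i ≠ modify then
        let cnt := counts.getD i 0
        if cnt > st.1 then (cnt, i) else st
      else st)
    (-1, -1)).2

-- ===== PRECONDITION & SPEC =====
def Spec_get_max_errors_cage (board : List (List Int)) (cages : List (Int × (List (Int × Int)))) (row_col_errors : List (Int × Int × Int)) (duplicates : List (Int × List (Int × Int))) (modify : Int) (out : Int) : Prop := out = get_max_errors_cage_alt board cages row_col_errors duplicates modify
instance (board : List (List Int)) (cages : List (Int × (List (Int × Int)))) (row_col_errors : List (Int × Int × Int)) (duplicates : List (Int × List (Int × Int))) (modify : Int) (out : Int) : Decidable (Spec_get_max_errors_cage board cages row_col_errors duplicates modify out) := by unfold Spec_get_max_errors_cage; infer_instance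

-- ===== CLAIM (what is proved, stated in full; the proofs are below) =====
def Claim_equal_get_max_errors_cage : Prop := ∀ (board : List (List Int)) (cages : List (Int × (List (Int × Int)))) (row_col_errors : List (Int × Int × Int)) (duplicates : List (Int × List (Int × Int))) (modify : Int), Dom_get_max_errors_cage board cages row_col_errors duplicates modify → Spec_get_max_errors_cage board cages row_col_errors duplicates modify (get_max_errors_cage board cages row_col_errors duplicates modify)

-- ===== LEMMAS AND PROOFS =====

-- a nested fold is a fold over the flattened list
theorem pv_foldl_flatMap {α β γ : Type} (g : α → List β) (f : γ → β → γ) :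
    ∀ (L : List α) (init : γ),
    (L.flatMap g).foldl f init = L.foldl (fun acc x => (g x).foldl f acc) init := by
  intro L
  induction L with
  | nil => intro init; simp
  | cons x L ih => intro init; simp [List.foldl_append, ih]

-- counting in a flattened list
theorem pv_count_flatMap {α β : Type} [DecidableEq β] (g : α → List β) (j : β) :
    ∀ (L : List α), (L.flatMap g).count j = (L.map (fun x => (g x).count j)).sum := by
  intro L
  induction L with
  | nil => simp
  | cons x L ih => simp [List.count_append, ih]

-- the pairs (coord, i) of one cage, filtered at c, yield i once per occurrence of c
theorem pv_filter_pairs (i : Int) (c : Int × Int) :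
    ∀ (cells : List (Int × Int)),
    ((cells.map (fun x => (x, i))).filter (fun q => q.1 == c)).map Prod.snd
      = List.replicate (cells.count c) i := by
  intro cells
  induction cells with
  | nil => simp
  | cons x cells ih =>
    by_cases h : x = c
    · subst h; simp [ih, List.replicate_succ]
    · simp [h, ih]

-- the owners index at c: each cage index, repeated once per occurrence of c in its cells
theorem pv_owners_getD (cages : List (Int × (List (Int × Int)))) (c : Int × Int) :
    (pvOwners cages).getD c []
      = (PySem.List.enumerate cages).flatMap (fun p => List.replicate (p.2.2.count c) p.1) := by
  have hflat : pvOwners cages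
    = ((PySem.List.enumerate cages).flatMap (fun p => p.2.2.map (fun x => (x, p.1)))).foldl
        (fun d q => d.modify q.1 [] (· ++ [q.2])) PySem.Dict.empty := by
    unfold pvOwners
    rw [pv_foldl_flatMap]
    refine PySem.List.foldl_congr_mem _ _ _ _ ?_
    intro acc p _
    rw [List.foldl_map]
  rw [hflat, PySem.Dict.getD_foldl_modify_append, PySem.Dict.getD_empty]
  rw [List.filter_flatMap, List.map_flatMap]
  simp only [List.nil_append]
  refine List.flatMap_congr ?_
  intro p _
  exact pv_filter_pairs p.1 c p.2.2

-- counting a cage index below the enumeration start yields nothing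
theorem pv_cnt0 (c : Int × Int) :
    ∀ (cages : List (Int × (List (Int × Int)))) (s j : Int), j < s →
    ((PySem.List.enumerate cages s).flatMap (fun p => List.replicate (p.2.2.count c) p.1)).count j = 0 := by
  intro cages
  induction cages with
  | nil => intro s j _; simp [PySem.List.enumerate]
  | cons a cages ih =>
    intro s j hj
    rw [PySem.List.enumerate_cons]
    simp only [List.flatMap_cons, List.count_append]
    rw [ih (s + 1) j (by omega)]
    have hne : ¬ s = j := by omega
    simp [List.count_replicate, hne]

-- counting cage index s+k in the flattened owners pairs = multiplicity of c in cage k's cells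
theorem pv_cnt (c : Int × Int) :
    ∀ (cages : List (Int × (List (Int × Int)))) (k : Nat) (s j : Int), j = s + (k : Int) →
    (hk : k < cages.length) →
    ((PySem.List.enumerate cages s).flatMap (fun p => List.replicate (p.2.2.count c) p.1)).count j
      = (cages[k]).2.count c := by
  intro cages
  induction cages with
  | nil => intro k s j _ hk; simp at hk
  | cons a cages ih =>
    intro k s j hj hk
    rw [PySem.List.enumerate_cons]
    simp only [List.flatMap_cons, List.count_append]
    cases k with
    | zero =>
      have hjs : j = s := by omega
      rw [hjs, pv_cnt0 c cages (s + 1) s (by omega)]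
      simp
    | succ k =>
      have hne : ¬ s = j := by omega
      rw [ih k (s + 1) j (by omega) (by simpa using hk)]
      simp [List.count_replicate, hne]

-- count in a duplicate-free list is a membership indicator
theorem pv_count_nodup {α : Type} [DecidableEq α] (l : List α) (h : l.Nodup) (a : α) :
    l.count a = if a ∈ l then 1 else 0 := by
  by_cases hm : a ∈ l
  · simp [hm, List.count_eq_one_of_mem h hm]
  · simp [hm, List.count_eq_zero_of_not_mem hm]

-- casting a Nat-valued sum to Int
theorem pv_cast_sum {α : Type} (f : α → Nat) :
    ∀ (l : List α), (((l.map f).sum : Nat) : Int) = (l.map (fun x => ((f x : Nat) : Int))).sum := by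
  intro l
  induction l with
  | nil => simp
  | cons x l ih => simp [ih]

-- summing a 0/1 indicator over a duplicate-free list is a membership test
theorem pv_sum_indicator (c : Int × Int) :
    ∀ (l : List (Int × Int)), l.Nodup →
    (l.map (fun v => if v = c then (1 : Int) else 0)).sum = if c ∈ l then 1 else 0 := by
  intro l
  induction l with
  | nil => simp
  | cons v l ih =>
    intro hnd
    rcases List.nodup_cons.mp hnd with ⟨hv, hnd'⟩
    by_cases hvc : v = c
    · subst hvc
      simp [ih hnd', if_neg hv]
    · have hmem : (c ∈ v :: l) ↔ (c ∈ l) := by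
        simp [List.mem_cons, Ne.symm hvc]
      simp only [List.map_cons, List.sum_cons, if_neg hvc, zero_add, ih hnd']
      by_cases hc : c ∈ l <;> simp [hc, hmem]

-- summing per-value multiplicities over the deduplicated values is counting members
theorem pv_sum_count (vals : List (Int × Int)) :
    ∀ (cells : List (Int × Int)),
    ((PySem.Set.ofList vals).map (fun v => (cells.count v : Int))).sum
      = (cells.countP (fun c => decide (c ∈ vals)) : Int) := by
  intro cells
  induction cells with
  | nil => simp
  | cons c cells ih =>
    have h1 : ∀ v : Int × Int, (((c :: cells).count v : Nat) : Int)
        = (cells.count v : Int) + (if v = c then 1 else 0) := by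
      intro v
      rw [List.count_cons]
      by_cases h : v = c
      · simp [h]
      · simp [h]
        exact fun hh => h hh.symm
    have h2 : ((PySem.Set.ofList vals).map (fun v => ((c :: cells).count v : Int))).sum
        = ((PySem.Set.ofList vals).map (fun v => (cells.count v : Int) + (if v = c then 1 else 0))).sum := by
      exact congrArg List.sum (List.map_congr_left (fun v _ => h1 v))
    have h3 : ((PySem.Set.ofList vals).map (fun v => if v = c then (1 : Int) else 0)).sum
        = if c ∈ vals then 1 else 0 := by
      rw [pv_sum_indicator c (PySem.Set.ofList vals) (PySem.Set.nodup_ofList vals)]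
      by_cases hc : c ∈ vals <;> simp [hc, PySem.Set.mem_ofList]
    rw [h2, PySem.List.sum_map_add_int, ih, h3, List.countP_cons]
    by_cases hc : c ∈ vals <;> simp [hc]

-- per-cage characterisation of A's helper
theorem pv_cce_eq (cells : List (Int × Int)) (rce : List (Int × Int × Int)) (dups : List (Int × List (Int × Int))) :
    count_cage_errors cells rce dups
      = ((PySem.Set.ofList (rce.map Prod.snd)).map (fun v => (cells.count v : Int))).sum
        + (dups.map (fun p => (p.2.map (fun c => if c ∈ cells then (1 : Int) else 0)).sum)).sum := by
  unfold count_cage_errors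
  simp only [PySem.List.foldl_ite_add_one]
  rw [PySem.List.foldl_add (g := fun p : Int × List (Int × Int) => ((p.2.countP (fun c => decide (c ∈ cells)) : Nat) : Int))]
  rw [pv_sum_count]
  have hconv : ∀ l : List (Int × Int),
      (l.map (fun c => if c ∈ cells then (1 : Int) else 0)).sum = (l.countP (fun c => decide (c ∈ cells)) : Int) := by
    intro l
    have h := PySem.List.sum_map_ite_one_zero (fun c : Int × Int => decide (c ∈ cells)) l
    simpa using h
  simp only [hconv]
  ring

-- the counters dict holds exactly A's per-cage error count at every valid cage index
theorem pv_counts_getD (cages : List (Int × (List (Int × Int)))) (rce : List (Int × Int × Int)) (dups : List (Int × List (Int × Int)))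
    (j : Int) (k : Nat) (hj : j = (k : Int)) (hk : k < cages.length) :
    (pvCounts cages rce dups).getD j 0 = count_cage_errors (cages[k]).2 rce dups := by
  simp only [pvCounts]
  have hO : ∀ c : Int × Int, (pvOwners cages).getD c []
      = (PySem.List.enumerate cages).flatMap (fun p => List.replicate (p.2.2.count c) p.1) :=
    pv_owners_getD cages
  -- flatten the two counter loops
  have h1 : (PySem.Set.ofList (rce.map Prod.snd)).foldl
      (fun d v => ((pvOwners cages).getD v []).foldl (fun d i => d.modify i 0 (· + 1)) d)
      (PySem.Dict.empty : PySem.Dict Int Int)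
    = ((PySem.Set.ofList (rce.map Prod.snd)).flatMap (fun v => (pvOwners cages).getD v [])).foldl
        (fun d i => d.modify i 0 (· + 1)) (PySem.Dict.empty : PySem.Dict Int Int) := by
    rw [pv_foldl_flatMap]
  have h2 : ∀ (d0 : PySem.Dict Int Int), dups.foldl
      (fun d p => p.2.foldl
        (fun d c => (PySem.Set.ofList ((pvOwners cages).getD c [])).foldl (fun d i => d.modify i 0 (· + 1)) d) d)
      d0
    = (dups.flatMap (fun p => p.2.flatMap (fun c => (PySem.Set.ofList ((pvOwners cages).getD c []) : List Int)))).foldl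
        (fun d i => d.modify i 0 (· + 1)) d0 := by
    intro d0
    rw [pv_foldl_flatMap]
    refine PySem.List.foldl_congr_mem _ _ _ _ ?_
    intro d p _
    rw [pv_foldl_flatMap]
  rw [h2, h1, PySem.Dict.getD_foldl_modify_add_one, PySem.Dict.getD_foldl_modify_add_one,
    PySem.Dict.getD_empty]
  -- evaluate the two flat counts
  simp only [pv_count_flatMap]
  have hmem : ∀ c : Int × Int, j ∈ (pvOwners cages).getD c [] ↔ c ∈ (cages[k]).2 := by
    intro c
    rw [hO c]
    constructor
    · intro hm
      have := List.count_pos_iff.mpr hm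
      rw [pv_cnt c cages k 0 j (by omega) hk] at this
      exact List.count_pos_iff.mp this
    · intro hm
      apply List.count_pos_iff.mp
      rw [pv_cnt c cages k 0 j (by omega) hk]
      exact List.count_pos_iff.mpr hm
  have hK1 : ((PySem.Set.ofList (rce.map Prod.snd)).map (fun v => ((pvOwners cages).getD v []).count j)).sum
      = ((PySem.Set.ofList (rce.map Prod.snd)).map (fun v => (cages[k]).2.count v)).sum := by
    refine congrArg List.sum (List.map_congr_left ?_)
    intro v _
    rw [hO v, pv_cnt v cages k 0 j (by omega) hk]
  have hK2 : ∀ c : Int × Int, ((PySem.Set.ofList ((pvOwners cages).getD c []) : List Int)).count j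
      = if c ∈ (cages[k]).2 then 1 else 0 := by
    intro c
    rw [pv_count_nodup _ (PySem.Set.nodup_ofList _) j]
    simp only [PySem.Set.mem_ofList, hmem c]
  rw [hK1]
  have hcast1 : (((((PySem.Set.ofList (rce.map Prod.snd)).map (fun v => (cages[k]).2.count v)).sum : Nat)) : Int)
      = ((PySem.Set.ofList (rce.map Prod.snd)).map (fun v => ((cages[k]).2.count v : Int))).sum := by
    rw [pv_cast_sum]
  have hcast2 : (((dups.map (fun p => (p.2.map (fun c => ((PySem.Set.ofList ((pvOwners cages).getD c []) : List Int)).count j)).sum)).sum : Nat) : Int)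
      = (dups.map (fun p => (p.2.map (fun c => if c ∈ (cages[k]).2 then (1 : Int) else 0)).sum)).sum := by
    rw [pv_cast_sum]
    refine congrArg List.sum (List.map_congr_left ?_)
    intro p _
    rw [pv_cast_sum]
    refine congrArg List.sum (List.map_congr_left ?_)
    intro c _
    rw [hK2 c]
    by_cases h : c ∈ (cages[k]).2 <;> simp [h]
  rw [hcast1, hcast2, pv_cce_eq]
  ring

-- ===== VERDICT (by name: the statement is the Claim_ definition above) =====
theorem get_max_errors_cage_spec : Claim_equal_get_max_errors_cage := by
  intro board cages rce dups modify _
  unfold Spec_get_max_errors_cage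
  show get_max_errors_cage board cages rce dups modify = _
  simp only [get_max_errors_cage, get_max_errors_cage_alt]
  rw [PySem.List.enumerate_eq_map_pyRange (d := ((0 : Int), ([] : List (Int × Int)))), List.foldl_map]
  simp only [PySem.List.len_eq]
  refine congrArg Prod.snd (PySem.List.foldl_congr_mem _ _ _ _ ?_)
  intro st i hi
  rw [PySem.List.mem_pyRange_one] at hi
  obtain ⟨h0, h1⟩ := hi
  have hk : i.toNat < cages.length := by omega
  have hget : PySem.List.pyGetD cages i ((0 : Int), ([] : List (Int × Int))) = cages[i.toNat] := by
    apply PySem.List.pyGetD_eq_getElem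
    · exact h0
    · simpa using h1
  simp only [hget]
  rw [pv_counts_getD cages rce dups i i.toNat (by omega) hk]
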